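-- pv_equiv track=rewrite | github.com/Lucasgr29/json_etl_python | Profundizacion.py | transform
-- ===== SOURCE A (Python) =====
-- def transform(dataset, min, max):
--
--     bajo_min = [x for x in dataset if x['precio'] < min]
--     medio = [x for x in dataset if min <= x['precio'] <= max ]
--     sobre_min = [x for x in dataset if x['precio'] > max]
--
--     cant_min = len(bajo_min)
--     cant_medio = len(medio)
--     cant_max = len(sobre_min)
--
--     return[cant_min, cant_medio, cant_max]
-- ===== SOURCE B (Python) =====
-- def transform(dataset, min, max):
--     cant_min = 0
--     cant_medio = 0
--     cant_max = 0
--     for x in dataset: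
--         p = x['precio']
--         if p < min:
--             cant_min += 1
--         if min <= p <= max:
--             cant_medio += 1
--         if p > max:
--             cant_max += 1
--     return [cant_min, cant_medio, cant_max]
-- ===== Notes on version B (the rewrite author's own statement) =====
-- stated objective: simpler
-- what changed: Replaces three separate filtering passes that each build an intermediate list with a single pass over the dataset maintaining three counters (three independent ifs, so overlapping ranges when min > max are counted exactly as A does).
import Mathlib
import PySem

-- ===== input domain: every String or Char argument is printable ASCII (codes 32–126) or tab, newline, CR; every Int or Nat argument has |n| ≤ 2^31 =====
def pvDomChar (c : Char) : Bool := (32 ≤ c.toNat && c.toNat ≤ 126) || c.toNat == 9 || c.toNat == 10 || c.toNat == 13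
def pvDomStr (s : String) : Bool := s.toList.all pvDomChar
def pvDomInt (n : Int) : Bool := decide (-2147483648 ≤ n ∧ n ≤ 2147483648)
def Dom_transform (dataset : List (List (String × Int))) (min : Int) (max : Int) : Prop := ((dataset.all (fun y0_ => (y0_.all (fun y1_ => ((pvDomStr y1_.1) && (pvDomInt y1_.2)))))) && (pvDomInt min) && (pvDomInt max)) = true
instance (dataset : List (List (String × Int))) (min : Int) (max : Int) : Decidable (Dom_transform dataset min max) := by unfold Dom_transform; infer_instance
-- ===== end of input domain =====

-- B replaces A's three list-building filter passes by one pass with three independent counters.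

-- ===== PORT A =====
-- x['precio'] : first-match lookup in the association list (Pre_ guarantees the key is present)
def pvPrecio (x : List (String × Int)) : Int := (x.lookup "precio").getD 0

def transform (dataset : List (List (String × Int))) (min : Int) (max : Int) : List Int :=
  let bajo_min := dataset.filter (fun x => decide (pvPrecio x < min))
  let medio := dataset.filter (fun x => decide (min ≤ pvPrecio x ∧ pvPrecio x ≤ max))
  let sobre_min := dataset.filter (fun x => decide (max < pvPrecio x))
  let cant_min : Int := bajo_min.length
  let cant_medio : Int := medio.length
  let cant_max : Int := sobre_min.length
  [cant_min, cant_medio, cant_max]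

-- ===== PORT B =====
def transform_alt (dataset : List (List (String × Int))) (min : Int) (max : Int) : List Int :=
  let r : Int × Int × Int := dataset.foldl (fun acc x =>
    let p := pvPrecio x
    let acc := if p < min then (acc.1 + 1, acc.2.1, acc.2.2) else acc
    let acc := if min ≤ p ∧ p ≤ max then (acc.1, acc.2.1 + 1, acc.2.2) else acc
    if max < p then (acc.1, acc.2.1, acc.2.2 + 1) else acc) (0, 0, 0)
  [r.1, r.2.1, r.2.2]

-- ===== PRECONDITION & SPEC =====
-- Pre_ excludes items lacking the key 'precio', on which Python A raises KeyError.
def Pre_transform (dataset : List (List (String × Int))) (min : Int) (max : Int) : Prop :=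
  dataset.all (fun x => x.any (fun p => p.1 == "precio")) = true
instance (dataset : List (List (String × Int))) (min : Int) (max : Int) : Decidable (Pre_transform dataset min max) := by unfold Pre_transform; infer_instance

def pvWitness_transform : (List (List (String × Int))) × Int × Int :=
  ([[("precio", 3)], [("precio", -1), ("otro", 7)]], 0, 5)

def Spec_transform (dataset : List (List (String × Int))) (min : Int) (max : Int) (out : List Int) : Prop := out = transform_alt dataset min max
instance (dataset : List (List (String × Int))) (min : Int) (max : Int) (out : List Int) : Decidable (Spec_transform dataset min max out) := by unfold Spec_transform; infer_instance

-- ===== CLAIM (what is proved, stated in full; the proofs are below) =====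
def Claim_equal_transform : Prop := ∀ (dataset : List (List (String × Int))) (min : Int) (max : Int), Dom_transform dataset min max → Pre_transform dataset min max → Spec_transform dataset min max (transform dataset min max)

-- ===== LEMMAS AND PROOFS =====
theorem transform_fold_inv (dataset : List (List (String × Int))) (min max : Int)
    (a b c : Int) :
    dataset.foldl (fun acc x =>
      let p := pvPrecio x
      let acc := if p < min then (acc.1 + 1, acc.2.1, acc.2.2) else acc
      let acc := if min ≤ p ∧ p ≤ max then (acc.1, acc.2.1 + 1, acc.2.2) else acc
      if max < p then (acc.1, acc.2.1, acc.2.2 + 1) else acc) (a, b, c)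
    = (a + (dataset.filter (fun x => decide (pvPrecio x < min))).length,
       b + (dataset.filter (fun x => decide (min ≤ pvPrecio x ∧ pvPrecio x ≤ max))).length,
       c + (dataset.filter (fun x => decide (max < pvPrecio x))).length) := by
  induction dataset generalizing a b c with
  | nil => simp
  | cons h t ih =>
    simp only [List.foldl_cons, List.filter_cons]
    by_cases h1 : pvPrecio h < min <;>
      by_cases h2 : min ≤ pvPrecio h ∧ pvPrecio h ≤ max <;>
        by_cases h3 : max < pvPrecio h <;>
          simp only [h1, h2, h3, decide_true, decide_false, if_true, if_false, and_self, true_and, and_true,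
            List.length_cons] <;>
          rw [ih] <;> simp only [Prod.ext_iff] <;> push_cast <;> omega

-- ===== VERDICT (by name: the statement is the Claim_ definition above) =====
theorem transform_spec : Claim_equal_transform := by
  intro dataset min max _ _
  unfold Spec_transform transform transform_alt
  rw [transform_fold_inv]
  simp
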